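-- pv_equiv track=rewrite | github.com/MauriceMatthys/Classic-Computer-Science-Algorithms | Python 4 - Functies/Big Mac index.py | bepaling
-- ===== SOURCE A (Python) =====
-- def bepaling(v):
--     waarde = {
--                 -25: "strongly underrated",
--                 -5: "underrated",
--                 5: "about equal",
--                 25: "overrated",
--                 26: "strongly overrated"
--             }
--     for key, value in waarde.items():
--         if v <= key:
--             return value
--     return value
-- ===== SOURCE B (Python) =====
-- import bisect
--
-- _BOUNDS = [-25, -5, 5, 25]
-- _RATINGS = ["strongly underrated", "underrated", "about equal",
--             "overrated", "strongly overrated"]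
--
-- def bepaling(v):
--     return _RATINGS[bisect.bisect_left(_BOUNDS, v)]
-- ===== Notes on version B (the rewrite author's own statement) =====
-- stated objective: idiomatic
-- what changed: Replaces the scan-until-first-match over a dict (with the redundant 26 key and the leftover-variable fallthrough) by a binary search (bisect_left) into a sorted boundary table indexing a parallel ratings list.
import Mathlib
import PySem

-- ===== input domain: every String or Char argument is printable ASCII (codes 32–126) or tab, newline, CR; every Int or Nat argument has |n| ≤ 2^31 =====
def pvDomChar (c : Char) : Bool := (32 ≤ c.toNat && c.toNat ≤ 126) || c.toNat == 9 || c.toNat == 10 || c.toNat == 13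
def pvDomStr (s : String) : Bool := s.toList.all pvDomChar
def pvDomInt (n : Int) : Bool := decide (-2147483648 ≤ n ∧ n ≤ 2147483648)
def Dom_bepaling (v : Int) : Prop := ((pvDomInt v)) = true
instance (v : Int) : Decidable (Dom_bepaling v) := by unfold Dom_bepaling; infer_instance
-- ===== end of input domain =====

-- B replaces A's first-match scan over a dict by a bisect_left binary search into a sorted
-- boundary table with a parallel ratings list (idiomatic; collapses the redundant 26 key).

-- ===== PORT A =====
-- the for-loop over waarde.items(): return value on v <= key, else after the loop return
-- the last loop variable 'value' (the dict is a nonempty literal, so it is always bound)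
def bepalingLoop (v : Int) : List (Int × String) → String → String
  | [], last => last
  | (k, s) :: rest, _ => if v ≤ k then s else bepalingLoop v rest s

def bepaling (v : Int) : String :=
  let waarde : PySem.Dict Int String := PySem.Dict.ofList
    [((-25 : Int), "strongly underrated"), (-5, "underrated"), (5, "about equal"),
     (25, "overrated"), (26, "strongly overrated")]
  bepalingLoop v (PySem.Dict.items waarde) ""

-- ===== PORT B =====
-- bisect.bisect_left: standard binary search, fuel = length (enough for the halving loop)
def bisectLeftGo (a : List Int) (x : Int) : Nat → Nat → Nat → Nat
  | 0, lo, _ => lo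
  | fuel + 1, lo, hi =>
    if lo < hi then
      let mid := (lo + hi) / 2
      if ((PySem.List.pyGet? a (Int.ofNat mid)).getD 0) < x then
        bisectLeftGo a x fuel (mid + 1) hi
      else
        bisectLeftGo a x fuel lo mid
    else lo

def bisectLeft (a : List Int) (x : Int) : Nat :=
  bisectLeftGo a x a.length 0 a.length

def pvBounds : List Int := [-25, -5, 5, 25]
def pvRatings : List String :=
  ["strongly underrated", "underrated", "about equal", "overrated", "strongly overrated"]

def bepaling_alt (v : Int) : String :=
  (PySem.List.pyGet? pvRatings (Int.ofNat (bisectLeft pvBounds v))).getD ""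

-- ===== PRECONDITION & SPEC =====
def Spec_bepaling (v : Int) (out : String) : Prop := out = bepaling_alt v
instance (v : Int) (out : String) : Decidable (Spec_bepaling v out) := by unfold Spec_bepaling; infer_instance

-- ===== CLAIM (what is proved, stated in full; the proofs are below) =====
def Claim_equal_bepaling : Prop := ∀ (v : Int), Dom_bepaling v → Spec_bepaling v (bepaling v)

-- ===== LEMMAS AND PROOFS =====

-- ===== VERDICT (by name: the statement is the Claim_ definition above) =====
theorem bepaling_spec : Claim_equal_bepaling := by
  intro v _
  show bepaling v = bepaling_alt v
  have hitems : (PySem.Dict.ofList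
      [((-25 : Int), "strongly underrated"), (-5, "underrated"), (5, "about equal"),
       (25, "overrated"), (26, "strongly overrated")]).items =
      [((-25 : Int), "strongly underrated"), (-5, "underrated"), (5, "about equal"),
       (25, "overrated"), (26, "strongly overrated")] := by decide
  simp only [bepaling, hitems, bepalingLoop]
  split_ifs <;>
    · simp only [bepaling_alt, bisectLeft, pvBounds, pvRatings]
      norm_num [bisectLeftGo, PySem.List.pyGet?, PySem.List.pyIdx?, show Int.toNat 2 = 2 from rfl, show Int.toNat 3 = 3 from rfl,
        List.getElem_cons_succ, List.getElem_cons_zero]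
      split_ifs <;> first | rfl | omega
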